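-- pv_equiv track=rewrite | github.com/kuangzipeng/Advanced-Programming | PersonalProject/文本人物、关系分析/book_analysis.py | Relation_analysis
-- ===== SOURCE A (Python) =====
-- def Relation_analysis(name_list,relation):
-- 	for each in name_list:	#取出每一段（1000词）中的人名列表
-- 		for nameA in each:
-- 			for nameB in each:
-- 				if nameA == nameB:
-- 					continue
-- 				if nameB in relation[nameA].keys():	#判断A的关系列表是否有B，若无则新建，有则次数加1
-- 					relation[nameA][nameB] += 1
-- 				else:
-- 					relation[nameA][nameB] = 1
-- 	return relation
-- ===== SOURCE B (Python) =====
-- def Relation_analysis(name_list, relation):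
--     # Per segment: count name frequencies once; then one row lookup per distinct
--     # name and a single batched update of ca*cb per distinct ordered pair,
--     # instead of a dict update for every ordered pair of occurrences.
--     for seg in name_list:
--         counts = {}
--         for n in seg:
--             counts[n] = counts.get(n, 0) + 1
--         if len(counts) > 1:
--             pairs = list(counts.items())
--             for a, ca in pairs:
--                 row = relation[a]
--                 for b, cb in pairs:
--                     if b != a:
--                         row[b] = row.get(b, 0) + ca * cb
--     return relation
-- ===== Notes on version B (the rewrite author's own statement) =====
-- stated objective: faster
-- what changed: Instead of one dict lookup-and-update per ordered pair of name occurrences (k^2 per segment), B counts name frequencies once per segment, skips segments with fewer than two distinct names, and for each distinct name fetches its relation row ONCE and applies a single batched update of ca*cb per distinct other name (d^2 row updates and d row lookups, d = distinct names).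
import Mathlib
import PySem

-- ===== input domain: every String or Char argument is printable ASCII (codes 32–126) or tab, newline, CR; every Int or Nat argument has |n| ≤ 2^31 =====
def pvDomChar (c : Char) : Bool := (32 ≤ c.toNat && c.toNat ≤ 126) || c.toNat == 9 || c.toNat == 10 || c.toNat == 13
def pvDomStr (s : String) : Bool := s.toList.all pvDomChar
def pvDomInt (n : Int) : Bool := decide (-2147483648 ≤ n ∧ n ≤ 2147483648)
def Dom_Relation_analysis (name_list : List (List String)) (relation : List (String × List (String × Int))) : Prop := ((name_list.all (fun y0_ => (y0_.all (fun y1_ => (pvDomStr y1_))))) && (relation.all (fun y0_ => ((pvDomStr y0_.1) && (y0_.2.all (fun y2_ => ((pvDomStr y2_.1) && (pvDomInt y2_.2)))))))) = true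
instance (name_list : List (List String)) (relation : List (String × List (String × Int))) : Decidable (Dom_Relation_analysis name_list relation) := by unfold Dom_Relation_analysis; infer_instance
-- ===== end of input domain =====

-- B replaces A's per-occurrence-pair dict updates by one frequency count per segment,
-- one row lookup per distinct name and a batched ca*cb update per distinct ordered name
-- pair (objective: faster). Python A mutates `relation` in place; the equivalence proved
-- here is about the RETURN value only (B performs the same in-place mutation).


-- ===== PORT A =====
-- A: for every segment, for every ordered pair of OCCURRENCES (nameA, nameB) with
-- nameA ≠ nameB, increment relation[nameA][nameB] (creating it at 1).
-- `relation[nameA]` on a missing key is Python's KeyError: `none` below, excluded by Pre_.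
def Relation_analysis (name_list : List (List String)) (relation : List (String × List (String × Int))) : List (String × List (String × Int)) :=
  let init : PySem.Dict String (PySem.Dict String Int) :=
    PySem.Dict.mk (relation.map (fun p => (p.1, PySem.Dict.mk p.2)))
  let final := name_list.foldl (fun rel each =>
      each.foldl (fun rel nameA =>
        each.foldl (fun rel nameB =>
          if nameA == nameB then rel
          else
            match rel.get? nameA with
            | none => rel   -- Python raises KeyError here; excluded by Pre_
            | some row =>
              if row.contains nameB then rel.insert nameA (row.modify nameB 0 (· + 1))
              else rel.insert nameA (row.insert nameB 1)) rel) rel) init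
  final.items.map (fun p => (p.1, p.2.items))

-- ===== PORT B =====
-- B (from Source B): per segment, build the frequency counter `counts`; if it has at least two
-- distinct names, fetch each name's row once and apply one batched update per other name.
def pvCounts (seg : List String) : PySem.Dict String Int :=
  seg.foldl (fun c n => c.insert n (c.getD n 0 + 1)) PySem.Dict.empty

def pvAddPairs (row : PySem.Dict String Int) (a : String) (ca : Int)
    (pairs : List (String × Int)) : PySem.Dict String Int :=
  pairs.foldl (fun row pb =>
    if pb.1 != a then row.insert pb.1 (row.getD pb.1 0 + ca * pb.2) else row) row

def pvSeg (rel : PySem.Dict String (PySem.Dict String Int)) (seg : List String) :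
    PySem.Dict String (PySem.Dict String Int) :=
  let pairs := (pvCounts seg).items
  if 1 < pairs.length then
    pairs.foldl (fun rel pa =>
      match rel.get? pa.1 with
      | none => rel   -- Python raises KeyError here; excluded by Pre_
      | some row => rel.insert pa.1 (pvAddPairs row pa.1 pa.2 pairs)) rel
  else rel

def pvLoop : List (List String) → PySem.Dict String (PySem.Dict String Int) →
    PySem.Dict String (PySem.Dict String Int)
  | [], rel => rel
  | seg :: rest, rel => pvLoop rest (pvSeg rel seg)

def Relation_analysis_alt (name_list : List (List String)) (relation : List (String × List (String × Int))) : List (String × List (String × Int)) :=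
  (pvLoop name_list
      (PySem.Dict.mk (relation.map (fun p => (p.1, PySem.Dict.mk p.2))))).items.map
    (fun p => (p.1, p.2.items))

-- ===== PRECONDITION & SPEC =====
-- Pre_ excludes (a) association lists with duplicate outer or inner keys — a Python dict
-- cannot contain them, so such a list does not denote any dict input — and (b) inputs where
-- some segment name that co-occurs with a distinct name is missing from relation's keys,
-- on which the Python raises KeyError.
def Pre_Relation_analysis (name_list : List (List String)) (relation : List (String × List (String × Int))) : Prop :=
  (relation.map Prod.fst).Nodup ∧
  (∀ p ∈ relation, (p.2.map Prod.fst).Nodup) ∧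
  (∀ seg ∈ name_list, ∀ a ∈ seg, (∃ b ∈ seg, b ≠ a) → a ∈ relation.map Prod.fst)
instance (name_list : List (List String)) (relation : List (String × List (String × Int))) : Decidable (Pre_Relation_analysis name_list relation) := by unfold Pre_Relation_analysis; infer_instance

def pvWitness_Relation_analysis : List (List String) × (List (String × List (String × Int))) :=
  ([["x", "y", "x"]], [("x", [("y", 1)]), ("y", [])])

def Spec_Relation_analysis (name_list : List (List String)) (relation : List (String × List (String × Int))) (out : List (String × List (String × Int))) : Prop := out = Relation_analysis_alt name_list relation
instance (name_list : List (List String)) (relation : List (String × List (String × Int))) (out : List (String × List (String × Int))) : Decidable (Spec_Relation_analysis name_list relation out) := by unfold Spec_Relation_analysis; infer_instance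

-- ===== CLAIM (what is proved, stated in full; the proofs are below) =====
def Claim_equal_Relation_analysis : Prop := ∀ (name_list : List (List String)) (relation : List (String × List (String × Int))), Dom_Relation_analysis name_list relation → Pre_Relation_analysis name_list relation → Spec_Relation_analysis name_list relation (Relation_analysis name_list relation)

-- ===== LEMMAS AND PROOFS =====

-- Proof-side helpers: both per-segment loops are sequences of "bump relation[a][b] by v" steps.
def bump2 (rel : PySem.Dict String (PySem.Dict String Int)) (a b : String) (v : Int) :
    PySem.Dict String (PySem.Dict String Int) :=
  match rel.get? a with
  | none => rel
  | some row => rel.insert a (row.insert b (row.getD b 0 + v))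

def app2 (rel : PySem.Dict String (PySem.Dict String Int)) (ops : List (String × String × Int)) :
    PySem.Dict String (PySem.Dict String Int) :=
  ops.foldl (fun r op => bump2 r op.1 op.2.1 op.2.2) rel

def rowApply (row : PySem.Dict String Int) (rops : List (String × Int)) : PySem.Dict String Int :=
  rops.foldl (fun row p => row.insert p.1 (row.getD p.1 0 + p.2)) row

def opsFor (k : String) (ops : List (String × String × Int)) : List (String × Int) :=
  (ops.filter (fun op => op.1 == k)).map (fun op => op.2)

def tot (rops : List (String × Int)) (b : String) : Int :=
  ((rops.filter (fun p => p.1 == b)).map (fun p => p.2)).sum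

def opsA (seg : List String) : List (String × String × Int) :=
  seg.flatMap (fun a => (seg.filter (fun b => !(a == b))).map (fun b => (a, b, (1 : Int))))

def opsB (seg : List String) : List (String × String × Int) :=
  (PySem.Dict.counter seg).items.flatMap (fun pa =>
    ((PySem.Dict.counter seg).items.filter (fun pb => !(pa.1 == pb.1))).map
      (fun pb => (pa.1, pb.1, pa.2 * pb.2)))

def segA (rel : PySem.Dict String (PySem.Dict String Int)) (each : List String) :
    PySem.Dict String (PySem.Dict String Int) :=
  each.foldl (fun rel nameA =>
    each.foldl (fun rel nameB =>
      if nameA == nameB then rel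
      else
        match rel.get? nameA with
        | none => rel
        | some row =>
          if row.contains nameB then rel.insert nameA (row.modify nameB 0 (· + 1))
          else rel.insert nameA (row.insert nameB 1)) rel) rel

def RInv (rel : PySem.Dict String (PySem.Dict String Int)) : Prop :=
  rel.keys.Nodup ∧ ∀ p ∈ rel.items, (PySem.Dict.keys p.2).Nodup

-- Stage 1: the two loop bodies are app2 over explicit op lists.
lemma app2_append (rel : PySem.Dict String (PySem.Dict String Int)) (l₁ l₂ : List (String × String × Int)) :
    app2 rel (l₁ ++ l₂) = app2 (app2 rel l₁) l₂ := by
  simp [app2, List.foldl_append]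

lemma app2_flatMap {α : Type} (rel : PySem.Dict String (PySem.Dict String Int)) (l : List α)
    (f : α → List (String × String × Int)) :
    app2 rel (l.flatMap f) = l.foldl (fun r x => app2 r (f x)) rel := by
  induction l generalizing rel with
  | nil => rfl
  | cons x xs ih => rw [List.flatMap_cons, app2_append, List.foldl_cons, ih]

lemma foldl_guard {α : Type} (l : List α) (key : α → String) (g : α → Int) (a : String)
    (r : PySem.Dict String (PySem.Dict String Int)) :
    l.foldl (fun r x => if a == key x then r else bump2 r a (key x) (g x)) r
      = app2 r ((l.filter (fun x => !(a == key x))).map (fun x => (a, key x, g x))) := by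
  induction l generalizing r with
  | nil => rfl
  | cons x xs ih =>
    rw [List.foldl_cons, ih]
    by_cases hx : a == key x
    · simp [hx]
    · simp only [List.filter_cons, hx, Bool.not_false, if_pos, List.map_cons]
      simp only [if_neg, Bool.false_eq_true, not_false_iff]
      rfl

lemma stepA_eq (r : PySem.Dict String (PySem.Dict String Int)) (a b : String) :
    (if a == b then r
     else
       match r.get? a with
       | none => r
       | some row =>
         if row.contains b then r.insert a (row.modify b 0 (· + 1))
         else r.insert a (row.insert b 1))
      = if a == b then r else bump2 r a b 1 := by
  by_cases hab : (a == b) = true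
  · simp [hab]
  · simp only [hab, Bool.false_eq_true, if_neg, not_false_iff]
    unfold bump2
    cases hga : r.get? a with
    | none => rfl
    | some row =>
      by_cases hc : row.contains b
      · simp [hc, PySem.Dict.modify]
      · simp [hc, PySem.Dict.getD_of_not_contains row 0 (by simpa using hc)]

lemma segA_eq (rel : PySem.Dict String (PySem.Dict String Int)) (seg : List String) :
    segA rel seg = app2 rel (opsA seg) := by
  unfold segA opsA
  rw [app2_flatMap]
  apply List.foldl_ext
  intro rel a _
  have := foldl_guard seg (fun b => b) (fun _ => (1 : Int)) a rel
  simp only [] at this ⊢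
  rw [List.foldl_ext _ _ _ (fun r b _ => stepA_eq r a b), this]

-- B's batched row update is a rowApply over the filtered counter pairs.
lemma addPairs_eq (row : PySem.Dict String Int) (a : String) (ca : Int)
    (pairs : List (String × Int)) :
    pvAddPairs row a ca pairs
      = rowApply row ((pairs.filter (fun pb => !(a == pb.1))).map
          (fun pb => (pb.1, ca * pb.2))) := by
  induction pairs generalizing row with
  | nil => rfl
  | cons pb rest ih =>
    by_cases h : pb.1 = a
    · have hb : (a == pb.1) = true := beq_iff_eq.mpr h.symm
      have hb' : (pb.1 != a) = false := by simp [bne, h]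
      simp only [pvAddPairs, List.foldl_cons, hb', Bool.false_eq_true, if_neg, not_false_iff,
        List.filter_cons, hb, Bool.not_true]
      exact ih row
    · have hb : (a == pb.1) = false := beq_eq_false_iff_ne.mpr (Ne.symm h)
      have hb' : (pb.1 != a) = true := by simp [bne, h]
      simp only [pvAddPairs, List.foldl_cons, hb', if_pos, List.filter_cons, hb,
        Bool.not_false, List.map_cons]
      exact ih _

-- Overwriting an existing key with its own value is the identity (Nodup keys).
lemma insert_self_of_get? (rel : PySem.Dict String (PySem.Dict String Int))
    (a : String) (row : PySem.Dict String Int)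
    (h : rel.keys.Nodup) (hga : rel.get? a = some row) : rel.insert a row = rel := by
  have hc : rel.contains a = true := by
    rw [PySem.Dict.contains_eq_isSome_get?, hga]; rfl
  have hitems := PySem.Dict.items_insert_of_contains rel row hc
  have hmap : rel.items.map (fun p => if p.1 == a then (a, row) else p) = rel.items := by
    conv_rhs => rw [← List.map_id rel.items]
    apply List.map_congr_left
    intro p hp
    obtain ⟨p1, p2⟩ := p
    by_cases hpa : (p1 == a) = true
    · have hp1 : p1 = a := eq_of_beq hpa
      have hrow : rel.get? p1 = some p2 := PySem.Dict.get?_of_mem_items rel hp h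
      rw [hp1, hga] at hrow
      have hp2 : row = p2 := Option.some.inj hrow
      simp [hp1, hp2]
    · simp [hpa]
  calc rel.insert a row = PySem.Dict.mk ((rel.insert a row).items) := rfl
    _ = PySem.Dict.mk rel.items := by rw [hitems, hmap]
    _ = rel := rfl

-- A run of bump2's at one outer key collapses to a single lookup + batched insert.
lemma app2_const_key (a : String) (rops : List (String × Int))
    (rel : PySem.Dict String (PySem.Dict String Int)) (h : rel.keys.Nodup) :
    app2 rel (rops.map (fun p => (a, p.1, p.2)))
      = match rel.get? a with
        | none => rel
        | some row => rel.insert a (rowApply row rops) := by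
  induction rops generalizing rel with
  | nil =>
    cases hga : rel.get? a with
    | none => rfl
    | some row =>
      simpa [app2, rowApply] using (insert_self_of_get? rel a row h hga).symm
  | cons p ps ih =>
    have hstep : app2 rel (((p :: ps).map (fun p => (a, p.1, p.2))))
        = app2 (bump2 rel a p.1 p.2) (ps.map (fun p => (a, p.1, p.2))) := rfl
    rw [hstep]
    cases hga : rel.get? a with
    | none =>
      have hb : bump2 rel a p.1 p.2 = rel := by simp [bump2, hga]
      rw [hb, ih rel h, hga]
    | some row =>
      have hb : bump2 rel a p.1 p.2
          = rel.insert a (row.insert p.1 (row.getD p.1 0 + p.2)) := by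
        simp [bump2, hga]
      rw [hb, ih _ (PySem.Dict.nodup_keys_insert rel a _ h), PySem.Dict.get?_insert_self]
      dsimp only
      rw [PySem.Dict.insert_insert_self]
      rfl

-- Stage 1 for B: pvSeg equals app2 over opsB.
lemma pvCounts_eq_counter (seg : List String) : pvCounts seg = PySem.Dict.counter seg := by
  simpa [pvCounts] using PySem.Dict.foldl_insert_getD_add_one_eq_counter seg

lemma foldl_batch_eq (pairs l : List (String × Int))
    (rel : PySem.Dict String (PySem.Dict String Int)) (h : rel.keys.Nodup) :
    l.foldl (fun rel pa =>
        match rel.get? pa.1 with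
        | none => rel
        | some row => rel.insert pa.1 (pvAddPairs row pa.1 pa.2 pairs)) rel
      = l.foldl (fun r pa =>
          app2 r ((pairs.filter (fun pb => !(pa.1 == pb.1))).map
            (fun pb => (pa.1, pb.1, pa.2 * pb.2)))) rel := by
  induction l generalizing rel with
  | nil => rfl
  | cons pa rest ih =>
    have hstep : (match rel.get? pa.1 with
        | none => rel
        | some row => rel.insert pa.1 (pvAddPairs row pa.1 pa.2 pairs))
      = app2 rel ((pairs.filter (fun pb => !(pa.1 == pb.1))).map
          (fun pb => (pa.1, pb.1, pa.2 * pb.2))) := by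
      have hmm : (pairs.filter (fun pb => !(pa.1 == pb.1))).map
            (fun pb => (pa.1, pb.1, pa.2 * pb.2))
          = ((pairs.filter (fun pb => !(pa.1 == pb.1))).map
              (fun pb => (pb.1, pa.2 * pb.2))).map (fun p => (pa.1, p.1, p.2)) := by
        rw [List.map_map]
        rfl
      rw [hmm, app2_const_key pa.1 _ rel h]
      cases hga : rel.get? pa.1 with
      | none => rfl
      | some row => simp [addPairs_eq]
    have hnod : (match rel.get? pa.1 with
        | none => rel
        | some row => rel.insert pa.1 (pvAddPairs row pa.1 pa.2 pairs)).keys.Nodup := by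
      cases hga : rel.get? pa.1 with
      | none => exact h
      | some row => exact PySem.Dict.nodup_keys_insert rel _ _ h
    rw [List.foldl_cons, List.foldl_cons, ih _ hnod, hstep]

lemma pvSeg_eq (rel : PySem.Dict String (PySem.Dict String Int)) (seg : List String)
    (h : rel.keys.Nodup) : pvSeg rel seg = app2 rel (opsB seg) := by
  unfold pvSeg opsB
  rw [pvCounts_eq_counter]
  by_cases hlen : 1 < (PySem.Dict.counter seg).items.length
  · simp only [hlen, if_pos]
    rw [app2_flatMap]
    exact foldl_batch_eq _ _ rel h
  · simp only [hlen, if_neg, Bool.false_eq_true, not_false_iff]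
    match hit : (PySem.Dict.counter seg).items with
    | [] => simp [app2]
    | [pa] => simp [app2, List.filter_cons]
    | pa :: pb :: rest =>
      rw [hit] at hlen
      simp at hlen

-- Stage 2: app2 distributes over the (Nodup-keyed) outer entries.
lemma app2_canon (ops : List (String × String × Int))
    (rel : PySem.Dict String (PySem.Dict String Int)) (h : rel.keys.Nodup) :
    app2 rel ops = PySem.Dict.mk (rel.items.map (fun p => (p.1, rowApply p.2 (opsFor p.1 ops)))) := by
  induction ops generalizing rel with
  | nil =>
    cases rel with
    | mk items => simp [app2, opsFor, rowApply]
  | cons op ops ih =>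
    obtain ⟨a, b, v⟩ := op
    have hstep : app2 rel ((a, b, v) :: ops) = app2 (bump2 rel a b v) ops := rfl
    rw [hstep]
    cases hga : rel.get? a with
    | none =>
      have hbump : bump2 rel a b v = rel := by simp [bump2, hga]
      rw [hbump, ih rel h]
      have hnk : a ∉ rel.keys := (PySem.Dict.get?_eq_none_iff_not_mem_keys rel a).mp hga
      congr 1
      apply List.map_congr_left
      intro p hp
      have hpa : (a == p.1) = false := by
        apply beq_eq_false_iff_ne.mpr
        intro hEq
        exact hnk (hEq ▸ List.mem_map_of_mem hp)
      simp [opsFor, List.filter_cons, hpa]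
    | some row =>
      have hc : rel.contains a = true := by
        rw [PySem.Dict.contains_eq_isSome_get?, hga]; rfl
      have hbump : bump2 rel a b v = rel.insert a (row.insert b (row.getD b 0 + v)) := by
        simp [bump2, hga]
      have hkeys := PySem.Dict.keys_insert_of_contains rel (row.insert b (row.getD b 0 + v)) hc
      rw [hbump, ih _ (by rw [hkeys]; exact h)]
      rw [PySem.Dict.items_insert_of_contains rel _ hc, List.map_map]
      congr 1
      apply List.map_congr_left
      intro p hp
      by_cases hpa : (p.1 == a) = true
      · have hpa' : p.1 = a := eq_of_beq hpa
        have hrow : rel.get? p.1 = some p.2 := by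
          obtain ⟨p1, p2⟩ := p
          exact PySem.Dict.get?_of_mem_items rel hp h
        have hp2 : p.2 = row := by
          rw [hpa', hga] at hrow
          exact (Option.some.injEq _ _ ▸ hrow.symm : _)
        have hfilter : opsFor p.1 ((a, b, v) :: ops) = (b, v) :: opsFor p.1 ops := by
          simp [opsFor, List.filter_cons, hpa']
        simp only [Function.comp, hpa, if_pos]
        rw [hfilter]
        have : rowApply p.2 ((b, v) :: opsFor p.1 ops)
            = rowApply (p.2.insert b (p.2.getD b 0 + v)) (opsFor p.1 ops) := rfl
        rw [this, hp2, hpa']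
      · have hap : (a == p.1) = false := by
          apply beq_eq_false_iff_ne.mpr
          intro hEq
          exact hpa (by rw [hEq]; exact beq_self_eq_true _)
        simp only [Function.comp, hpa, Bool.false_eq_true, if_neg, not_false_iff]
        simp [opsFor, List.filter_cons, hap]

-- Stage 3: canonical form of a row update sequence.
lemma tot_cons (b x : String) (v : Int) (rest : List (String × Int)) :
    tot ((b, v) :: rest) x = if b = x then v + tot rest x else tot rest x := by
  by_cases h : b = x
  · simp [tot, List.filter_cons, h]
  · simp [tot, List.filter_cons, h]

lemma rowApply_canon (rops : List (String × Int)) (row : PySem.Dict String Int)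
    (h : row.keys.Nodup) :
    rowApply row rops
      = PySem.Dict.mk (row.items.map (fun q => (q.1, q.2 + tot rops q.1))
          ++ ((PySem.Set.ofList (rops.map (fun p => p.1))).filter
                (fun b => !(row.contains b))).map (fun b => (b, tot rops b))) := by
  induction rops generalizing row with
  | nil =>
    cases row with
    | mk items => simp [rowApply, tot, PySem.Set.ofList, PySem.Set.empty]
  | cons p rest ih =>
    obtain ⟨b, v⟩ := p
    have hstep : rowApply row ((b, v) :: rest)
        = rowApply (row.insert b (row.getD b 0 + v)) rest := rfl
    rw [hstep, ih _ (PySem.Dict.nodup_keys_insert row b _ h)]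
    by_cases hc : row.contains b = true
    · -- b already a key of row
      rw [PySem.Dict.items_insert_of_contains row _ hc, List.map_map]
      congr 1
      refine congrArg₂ (· ++ ·) ?_ ?_
      · apply List.map_congr_left
        intro q hq
        by_cases hqb : (q.1 == b) = true
        · have hq1 : q.1 = b := eq_of_beq hqb
          have hq2 : row.getD q.1 0 = q.2 := by
            obtain ⟨q1, q2⟩ := q
            exact PySem.Dict.getD_of_mem_items row hq h 0
          simp only [Function.comp, hqb, if_pos]
          rw [tot_cons]
          simp [hq1, ← hq2, add_assoc]
        · simp only [Function.comp, hqb, Bool.false_eq_true, if_neg, not_false_iff]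
          rw [tot_cons]
          have : ¬ b = q.1 := fun hEq => hqb (by rw [hEq]; exact beq_self_eq_true _)
          simp [this]
      · -- new-key suffix
        simp only [List.map_cons, PySem.Set.ofList_cons, PySem.Set.discard, List.filter_cons]
        have hcb : (!row.contains b) = false := by simp [hc]
        simp only [hcb, Bool.false_eq_true, if_neg, not_false_iff]
        have hfl : ∀ x : String,
            (!(row.insert b (row.getD b 0 + v)).contains x) = ((!row.contains x) && (!x == b)) := by
          intro x
          rw [PySem.Dict.contains_insert, Bool.not_or, Bool.and_comm]
        rw [List.filter_congr (fun x _ => hfl x), ← List.filter_filter]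
        · apply List.map_congr_left
          intro x hx
          have hxb : (!x == b) = true := ((List.mem_filter.mp (List.mem_filter.mp hx).1).2)
          rw [tot_cons]
          have : ¬ b = x := by
            intro hEq
            rw [hEq] at hxb
            simp at hxb
          simp [this]
    · -- b is a fresh key of row
      have hc' : row.contains b = false := by simpa using hc
      rw [PySem.Dict.items_insert_of_not_contains row _ hc']
      have hgd : row.getD b 0 = 0 := PySem.Dict.getD_of_not_contains row 0 hc'
      simp only [List.map_append, List.map_cons, List.map_nil, List.append_assoc]
      refine congrArg₂ (fun l₁ l₂ => PySem.Dict.mk (l₁ ++ l₂)) ?_ ?_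
      · apply List.map_congr_left
        intro q hq
        rw [tot_cons]
        have hqb : ¬ b = q.1 := by
          intro hEq
          have : row.contains q.1 = true :=
            (PySem.Dict.contains_iff_mem_keys row q.1).mpr (List.mem_map_of_mem hq)
          rw [← hEq] at this
          rw [this] at hc'
          cases hc'
        simp [hqb]
      · simp only [List.map_cons, PySem.Set.ofList_cons, PySem.Set.discard, List.filter_cons]
        have hcb : (!row.contains b) = true := by simp [hc']
        simp only [hcb, if_pos]
        rw [List.map_cons, List.singleton_append]
        congr 1
        · rw [tot_cons]
          simp [hgd]
        have hfl : ∀ x : String,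
            (!(row.insert b (row.getD b 0 + v)).contains x) = ((!row.contains x) && (!x == b)) := by
          intro x
          rw [PySem.Dict.contains_insert, Bool.not_or, Bool.and_comm]
        rw [List.filter_congr (fun x _ => hfl x), ← List.filter_filter]
        apply List.map_congr_left
        intro x hx
        have hxb : (!x == b) = true := ((List.mem_filter.mp (List.mem_filter.mp hx).1).2)
        rw [tot_cons]
        have : ¬ b = x := by
          intro hEq
          rw [hEq] at hxb
          simp at hxb
        simp [this]

lemma rowApply_congr (row : PySem.Dict String Int) (h : row.keys.Nodup)
    (r₁ r₂ : List (String × Int))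
    (hk : PySem.Set.ofList (r₁.map (fun p => p.1)) = PySem.Set.ofList (r₂.map (fun p => p.1)))
    (ht : ∀ x, tot r₁ x = tot r₂ x) :
    rowApply row r₁ = rowApply row r₂ := by
  rw [rowApply_canon r₁ row h, rowApply_canon r₂ row h]
  simp only [ht, hk]

-- Stage 4: the per-key op lists of A and B agree up to total and key set.
lemma opsFor_flatMap {α : Type} (k : String) (l : List α) (f : α → List (String × String × Int)) :
    opsFor k (l.flatMap f) = l.flatMap (fun x => opsFor k (f x)) := by
  simp [opsFor, List.filter_flatMap, List.map_flatMap]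

lemma opsFor_map_block {α : Type} (k a : String) (l : List α) (key : α → String) (g : α → Int) :
    opsFor k (l.map (fun x => (a, key x, g x)))
      = if a = k then l.map (fun x => (key x, g x)) else [] := by
  by_cases h : a = k
  · simp [opsFor, List.filter_map, Function.comp_def, h]
  · simp [opsFor, List.filter_map, Function.comp_def, h]

lemma flatMap_ite_count (l : List String) (k : String) (c : List (String × Int)) :
    (l.flatMap (fun a => if a = k then c else [])) = (List.replicate (l.count k) c).flatten := by
  induction l with
  | nil => rfl
  | cons x xs ih =>
    by_cases h : x = k
    · subst h
      rw [List.flatMap_cons, if_pos rfl, ih]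
      have hcount : List.count x (x :: xs) = List.count x xs + 1 := by
        simp [List.count_cons]
      rw [hcount, List.replicate_succ, List.flatten_cons]
    · have hb : (x == k) = false := beq_eq_false_iff_ne.mpr h
      simp [List.flatMap_cons, h, ih, List.count_cons, hb]

lemma flatMap_ite_nodup {α : Type} (l : List α) (key : α → String) (hn : (l.map key).Nodup)
    (k : String) (g : α → List (String × Int)) :
    l.flatMap (fun x => if key x = k then g x else [])
      = match l.find? (fun x => key x == k) with
        | some x => g x
        | none => [] := by
  induction l with
  | nil => rfl
  | cons x xs ih =>
    rw [List.map_cons] at hn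
    by_cases h : key x = k
    · have hrest : xs.flatMap (fun y => if key y = k then g y else []) = [] := by
        apply List.flatMap_eq_nil_iff.mpr
        intro y hy
        have : key y ≠ key x := fun hEq => (List.nodup_cons.mp hn).1 (hEq ▸ List.mem_map_of_mem hy)
        rw [if_neg (h ▸ this)]
      simp [List.flatMap_cons, h, hrest, List.find?_cons, beq_iff_eq]
    · have hb : (key x == k) = false := beq_eq_false_iff_ne.mpr h
      simp only [List.flatMap_cons, if_neg h, List.nil_append, List.find?_cons, hb]
      exact ih (List.nodup_cons.mp hn).2

lemma opsFor_opsA (k : String) (seg : List String) :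
    opsFor k (opsA seg)
      = (List.replicate (seg.count k)
          ((seg.filter (fun b => !(k == b))).map (fun b => (b, (1 : Int))))).flatten := by
  unfold opsA
  rw [opsFor_flatMap]
  have hpt : ∀ a : String,
      opsFor k ((seg.filter (fun b => !(a == b))).map (fun b => (a, b, (1 : Int))))
        = if a = k then (seg.filter (fun b => !(k == b))).map (fun b => (b, (1 : Int))) else [] := by
    intro a
    rw [opsFor_map_block k a _ (fun b => b) (fun _ => (1 : Int))]
    by_cases h : a = k
    · rw [h]
    · simp [h]
  rw [List.flatMap_congr (fun a _ => hpt a)]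
  exact flatMap_ite_count seg k _

lemma find?_self_eq (l : List String) (k : String) :
    List.find? (fun j => j == k) l = if k ∈ l then some k else none := by
  induction l with
  | nil => rfl
  | cons x xs ih =>
    rw [List.find?_cons]
    by_cases h : x = k
    · subst h
      simp
    · have hb : (x == k) = false := beq_eq_false_iff_ne.mpr h
      rw [hb, ih]
      by_cases hm : k ∈ xs
      · simp [hm, List.mem_cons]
      · have : k ∉ x :: xs := by simp [Ne.symm h, hm]
        simp [hm, this]

lemma opsFor_opsB (k : String) (seg : List String) :
    opsFor k (opsB seg)
      = if k ∈ seg then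
          ((PySem.Dict.counter seg).items.filter (fun pb => !(k == pb.1))).map
            (fun pb => (pb.1, (seg.count k : Int) * pb.2))
        else [] := by
  unfold opsB
  rw [opsFor_flatMap]
  have hpt : ∀ pa : String × Int,
      opsFor k (((PySem.Dict.counter seg).items.filter (fun pb => !(pa.1 == pb.1))).map
          (fun pb => (pa.1, pb.1, pa.2 * pb.2)))
        = if pa.1 = k then
            ((PySem.Dict.counter seg).items.filter (fun pb => !(pa.1 == pb.1))).map
              (fun pb => (pb.1, pa.2 * pb.2))
          else [] := by
    intro pa
    exact opsFor_map_block k pa.1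
      ((PySem.Dict.counter seg).items.filter (fun pb => !(pa.1 == pb.1)))
      (fun pb => pb.1) (fun pb => pa.2 * pb.2)
  rw [List.flatMap_congr (fun pa _ => hpt pa)]
  have hnod : ((PySem.Dict.counter seg).items.map (fun pa => pa.1)).Nodup :=
    PySem.Dict.nodup_keys_counter seg
  rw [flatMap_ite_nodup (PySem.Dict.counter seg).items (fun pa => pa.1) hnod k _]
  rw [PySem.Dict.items_counter]
  rw [List.find?_map]
  have hfind : List.find? ((fun p => p.1 == k) ∘ fun j => (j, (List.count j seg : Int)))
      (PySem.Set.ofList seg) = List.find? (fun j => j == k) (PySem.Set.ofList seg) := rfl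
  rw [hfind, find?_self_eq (PySem.Set.ofList seg) k]
  by_cases hk : k ∈ seg
  · have hk' : k ∈ PySem.Set.ofList seg := (PySem.Set.mem_ofList seg k).mpr hk
    rw [if_pos hk', if_pos hk]
    rfl
  · have hk' : k ∉ PySem.Set.ofList seg := fun hc => hk ((PySem.Set.mem_ofList seg k).mp hc)
    rw [if_neg hk', if_neg hk]
    rfl

lemma tot_append (l₁ l₂ : List (String × Int)) (x : String) :
    tot (l₁ ++ l₂) x = tot l₁ x + tot l₂ x := by
  simp [tot, List.filter_append]

lemma tot_flatten_replicate (n : Nat) (l : List (String × Int)) (x : String) :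
    tot ((List.replicate n l).flatten) x = n * tot l x := by
  induction n with
  | zero => simp [tot]
  | succ m ih =>
    rw [List.replicate_succ, List.flatten_cons, tot_append, ih]
    push_cast
    ring

lemma tot_map_one (xs : List String) (x : String) :
    tot (xs.map (fun b => (b, (1 : Int)))) x = xs.count x := by
  induction xs with
  | nil => simp [tot]
  | cons y ys ih =>
    rw [List.map_cons, tot_cons, List.count_cons]
    by_cases h : y = x
    · simp [h, ih]
      omega
    · have hb : (y == x) = false := beq_eq_false_iff_ne.mpr h
      simp [h, hb, ih]

lemma tot_map_key_nodup {α : Type} (l : List α) (key : α → String) (g : α → Int)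
    (hn : (l.map key).Nodup) (x : String) :
    tot (l.map (fun p => (key p, g p))) x
      = match l.find? (fun p => key p == x) with
        | some p => g p
        | none => 0 := by
  induction l with
  | nil => simp [tot]
  | cons p ps ih =>
    rw [List.map_cons] at hn
    obtain ⟨hn1, hn2⟩ := List.nodup_cons.mp hn
    rw [List.map_cons, tot_cons, List.find?_cons]
    by_cases h : key p = x
    · have hb : (key p == x) = true := beq_iff_eq.mpr h
      have hzero : tot (ps.map (fun q => (key q, g q))) x = 0 := by
        have : (ps.map (fun q => (key q, g q))).filter (fun q => q.1 == x) = [] := by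
          apply List.filter_eq_nil_iff.mpr
          intro q hq
          obtain ⟨y, hy, rfl⟩ := List.mem_map.mp hq
          intro hqx
          exact hn1 (by rw [h, ← eq_of_beq hqx]; exact List.mem_map_of_mem hy)
        simp [tot, this]
      simp [h, hb, hzero]
    · have hb : (key p == x) = false := beq_eq_false_iff_ne.mpr h
      simp only [h, if_neg, hb, Bool.false_eq_true, not_false_iff]
      exact ih hn2

lemma filter_comm {α : Type} (p q : α → Bool) (l : List α) :
    List.filter p (List.filter q l) = List.filter q (List.filter p l) := by
  rw [List.filter_filter, List.filter_filter]
  exact List.filter_congr (fun a _ => Bool.and_comm _ _)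

lemma ofList_filter (l : List String) (p : String → Bool) :
    PySem.Set.ofList (l.filter p) = (PySem.Set.ofList l).filter p := by
  induction l with
  | nil => rfl
  | cons x xs ih =>
    rw [List.filter_cons, PySem.Set.ofList_cons, PySem.Set.discard]
    by_cases hp : p x = true
    · rw [if_pos hp, PySem.Set.ofList_cons, ih, PySem.Set.discard, List.filter_cons,
        if_pos hp, filter_comm]
    · rw [if_neg hp, ih, List.filter_cons, if_neg hp, filter_comm]
      symm
      apply List.filter_eq_self.mpr
      intro y hy
      have hpy : p y = true := (List.mem_filter.mp hy).2
      have : y ≠ x := fun hEq => hp (hEq ▸ hpy)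
      simpa using this

lemma ofList_flatten_replicate (n : Nat) (hn : n ≠ 0) (l : List String) :
    PySem.Set.ofList ((List.replicate n l).flatten) = PySem.Set.ofList l := by
  obtain ⟨m, rfl⟩ : ∃ m, n = m + 1 := ⟨n - 1, (Nat.succ_pred_eq_of_pos (Nat.pos_of_ne_zero hn)).symm⟩
  rw [List.replicate_succ, List.flatten_cons, PySem.Set.ofList_append,
    PySem.Set.update_eq_append_filter]
  have : (PySem.Set.ofList (List.replicate m l).flatten).filter
      (fun y => !(PySem.Set.ofList l).contains y) = [] := by
    apply List.filter_eq_nil_iff.mpr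
    intro y hy
    have hyl : y ∈ l := by
      have := (PySem.Set.mem_ofList _ y).mp hy
      obtain ⟨t, ht, hyt⟩ := List.mem_flatten.mp this
      rwa [(List.eq_of_mem_replicate ht)] at hyt
    have : y ∈ PySem.Set.ofList l := (PySem.Set.mem_ofList l y).mpr hyl
    simp [this]
  rw [this, List.append_nil]

-- The heart: per outer key, A's occurrence-pair updates equal B's counted updates.
lemma heart (k : String) (seg : List String) (row : PySem.Dict String Int)
    (h : row.keys.Nodup) :
    rowApply row (opsFor k (opsA seg)) = rowApply row (opsFor k (opsB seg)) := by
  by_cases hk : k ∈ seg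
  · have hcpos : seg.count k ≠ 0 := by
      rw [Ne, List.count_eq_zero]
      exact fun hc => hc hk
    have hfl : ((PySem.Dict.counter seg).items.filter (fun pb => !(k == pb.1)))
        = ((PySem.Set.ofList seg).filter (fun j => !(k == j))).map
            (fun j => (j, (List.count j seg : Int))) := by
      rw [PySem.Dict.items_counter, List.filter_map]
      rfl
    rw [opsFor_opsA, opsFor_opsB, if_pos hk]
    apply rowApply_congr row h
    · -- same key sets
      rw [List.map_flatten, List.map_replicate]
      have hLA : ((seg.filter (fun b => !(k == b))).map (fun b => (b, (1 : Int)))).map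
          (fun p => p.1) = seg.filter (fun b => !(k == b)) := by
        simp [List.map_map, Function.comp_def]
      rw [hLA, ofList_flatten_replicate _ hcpos, ofList_filter, hfl]
      have hkeys2 : ((((PySem.Set.ofList seg).filter (fun j => !(k == j))).map
            (fun j => (j, (List.count j seg : Int)))).map
            (fun pb => (pb.1, (seg.count k : Int) * pb.2))).map (fun p => p.1)
          = (PySem.Set.ofList seg).filter (fun j => !(k == j)) := by
        simp [List.map_map, Function.comp_def]
      rw [hkeys2, PySem.Set.ofList_eq_self_of_nodup _
        ((PySem.Set.nodup_ofList seg).filter _)]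
    · -- same per-key totals
      intro x
      rw [tot_flatten_replicate, tot_map_one, hfl, List.map_map]
      have hcomp : ((fun pb : String × Int => (pb.1, (seg.count k : Int) * pb.2))
          ∘ fun j => (j, (List.count j seg : Int)))
          = fun j => ((fun j => j) j, (fun j => (seg.count k : Int) * (List.count j seg : Int)) j) := rfl
      rw [hcomp]
      have hnodf : (((PySem.Set.ofList seg).filter (fun j => !(k == j))).map (fun j => j)).Nodup := by
        rw [List.map_id' _]
        exact (PySem.Set.nodup_ofList seg).filter _
      rw [tot_map_key_nodup _ (fun j => j) _ hnodf x]
      have hfind : List.find? (fun j => j == x)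
          ((PySem.Set.ofList seg).filter (fun j => !(k == j)))
          = if x ∈ (PySem.Set.ofList seg).filter (fun j => !(k == j)) then some x else none :=
        find?_self_eq _ x
      rw [hfind]
      by_cases hx : x ∈ (PySem.Set.ofList seg).filter (fun j => !(k == j))
      · rw [if_pos hx]
        have hqx : (!(k == x)) = true := (List.mem_filter.mp hx).2
        have : List.count x (seg.filter (fun b => !(k == b))) = List.count x seg :=
          List.count_filter hqx
        rw [this]
      · rw [if_neg hx]
        have hcnt : List.count x (seg.filter (fun b => !(k == b))) = 0 := by
          rw [List.count_eq_zero]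
          intro hmem
          apply hx
          have hxseg : x ∈ seg := (List.mem_filter.mp hmem).1
          exact List.mem_filter.mpr ⟨(PySem.Set.mem_ofList seg x).mpr hxseg,
            (List.mem_filter.mp hmem).2⟩
        rw [hcnt]
        simp
  · have hc0 : seg.count k = 0 := List.count_eq_zero.mpr hk
    rw [opsFor_opsA, opsFor_opsB, if_neg hk, hc0]
    rfl

-- Stage 5: segment equality, invariant preservation, induction over segments.
lemma seg_eq (rel : PySem.Dict String (PySem.Dict String Int)) (seg : List String)
    (h : RInv rel) : segA rel seg = pvSeg rel seg := by
  rw [segA_eq, pvSeg_eq rel seg h.1, app2_canon _ _ h.1, app2_canon _ _ h.1]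
  congr 1
  apply List.map_congr_left
  intro p hp
  rw [heart p.1 seg p.2 (h.2 p hp)]

lemma keys_rowApply (rops : List (String × Int)) (row : PySem.Dict String Int)
    (h : row.keys.Nodup) : (rowApply row rops).keys.Nodup := by
  exact PySem.Dict.nodup_keys_foldl_insert_key rops (fun p => p.1)
    (fun d p => d.getD p.1 0 + p.2) row h

lemma inv_segA (rel : PySem.Dict String (PySem.Dict String Int)) (seg : List String)
    (h : RInv rel) : RInv (segA rel seg) := by
  rw [segA_eq, app2_canon _ _ h.1]
  constructor
  · have : (PySem.Dict.mk (rel.items.map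
        (fun p => (p.1, rowApply p.2 (opsFor p.1 (opsA seg)))))).keys
        = rel.keys := by
      simp [PySem.Dict.keys, List.map_map, Function.comp_def]
    rw [this]
    exact h.1
  · intro p hp
    obtain ⟨q, hq, rfl⟩ := List.mem_map.mp hp
    exact keys_rowApply _ _ (h.2 q hq)

lemma fold_eq (nl : List (List String)) (rel : PySem.Dict String (PySem.Dict String Int))
    (h : RInv rel) : nl.foldl segA rel = pvLoop nl rel := by
  induction nl generalizing rel with
  | nil => rfl
  | cons s ss ih =>
    rw [List.foldl_cons, pvLoop, ← seg_eq rel s h, ih _ (inv_segA rel s h)]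

-- ===== VERDICT (by name: the statement is the Claim_ definition above) =====
theorem Relation_analysis_spec : Claim_equal_Relation_analysis := by
  intro name_list relation _hdom hpre
  unfold Spec_Relation_analysis Relation_analysis Relation_analysis_alt
  have hfold : name_list.foldl segA
      (PySem.Dict.mk (relation.map (fun p => (p.1, PySem.Dict.mk p.2))))
      = pvLoop name_list
      (PySem.Dict.mk (relation.map (fun p => (p.1, PySem.Dict.mk p.2)))) := by
    apply fold_eq
    constructor
    · have : (PySem.Dict.mk (relation.map (fun p => (p.1, PySem.Dict.mk p.2)))).keys
          = relation.map Prod.fst := by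
        simp [PySem.Dict.keys, List.map_map, Function.comp_def]
      rw [this]
      exact hpre.1
    · intro p hp
      obtain ⟨q, hq, rfl⟩ := List.mem_map.mp hp
      have := hpre.2.1 q hq
      simpa [PySem.Dict.keys] using this
  show (name_list.foldl segA
      (PySem.Dict.mk (relation.map (fun p => (p.1, PySem.Dict.mk p.2))))).items.map
        (fun p => (p.1, p.2.items))
    = (pvLoop name_list
      (PySem.Dict.mk (relation.map (fun p => (p.1, PySem.Dict.mk p.2))))).items.map
        (fun p => (p.1, p.2.items))
  rw [hfold]
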